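-- pv_equiv track=rewrite | github.com/ericmerle3789/Collatz-Junction-Theorem | scripts/research/r48_sdl_investigator.py | enumerate_B_vectors
-- ===== SOURCE A (Python) =====
-- from math import comb, gcd, ceil, log2, sqrt, log, pi
-- from itertools import combinations_with_replacement
--
-- def compute_S(k):
--     """Minimal S such that 2^S > 3^k. Exact via integer comparison."""
--     S = ceil(k * log2(3))
--     three_k = 3 ** k
--     while (1 << S) <= three_k:
--         S += 1
--     while S > 0 and (1 << (S - 1)) > three_k:
--         S -= 1
--     return S
--
-- def compute_max_B(k):
--     """max_B = S - k."""
--     return compute_S(k) - k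
--
-- def enumerate_B_vectors(k, max_B=None):
--     """Generate all nondecreasing B-vectors: 0 <= B_0 <= ... <= B_{k-1} = max_B."""
--     if max_B is None:
--         max_B = compute_max_B(k)
--     if k == 1:
--         yield (max_B,)
--         return
--     for combo in combinations_with_replacement(range(max_B + 1), k - 1):
--         if combo[-1] <= max_B:
--             yield combo + (max_B,)
-- ===== SOURCE B (Python) =====
-- def enumerate_B_vectors(k, max_B=None):
--     """Generate all nondecreasing B-vectors: 0 <= B_0 <= ... <= B_{k-1} = max_B.
--
--     Recursive backtracking instead of itertools.combinations_with_replacement;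
--     the default max_B is computed exactly via int.bit_length instead of the
--     float-seeded correction loops."""
--     if max_B is None:
--         # minimal S with 2**S > 3**k is (3**k).bit_length(); max_B = S - k
--         max_B = (3 ** k).bit_length() - k
--     if k == 1:
--         yield (max_B,)
--         return
--
--     def gen(remaining, start):
--         if remaining == 0:
--             yield ()
--         else:
--             for v in range(start, max_B + 1):
--                 for rest in gen(remaining - 1, v):
--                     yield (v,) + rest
--
--     for prefix in gen(k - 1, 0):
--         yield prefix + (max_B,)
-- ===== Notes on version B (the rewrite author's own statement) =====
-- stated objective: alternative
-- what changed: Replaces combinations_with_replacement over range(max_B+1) plus the redundant last-element filter with a recursive backtracking generator that threads the running lower bound, and computes the default max_B with an exact bit_length formula instead of the float-seeded while-loop correction of compute_S.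
import Mathlib
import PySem

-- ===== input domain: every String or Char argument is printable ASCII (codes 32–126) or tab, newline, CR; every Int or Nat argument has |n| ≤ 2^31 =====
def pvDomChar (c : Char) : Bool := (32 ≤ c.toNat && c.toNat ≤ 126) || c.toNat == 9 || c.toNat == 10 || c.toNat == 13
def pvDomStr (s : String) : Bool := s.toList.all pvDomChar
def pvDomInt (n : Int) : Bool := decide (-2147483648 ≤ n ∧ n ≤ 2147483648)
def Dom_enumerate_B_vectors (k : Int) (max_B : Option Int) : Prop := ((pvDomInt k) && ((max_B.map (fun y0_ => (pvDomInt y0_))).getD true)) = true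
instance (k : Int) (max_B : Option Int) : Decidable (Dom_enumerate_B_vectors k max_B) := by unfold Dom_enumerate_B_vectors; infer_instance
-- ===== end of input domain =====

-- B replaces combinations_with_replacement + last-element filter by a recursive
-- backtracking generator threading the lower bound, and computes the default max_B
-- by an exact bit_length formula instead of the float-seeded correction loops (alternative decomposition).

-- ===== PORT A =====
-- while (1 << S) <= three_k: S += 1
-- (fuel makes the loop total; it exits as soon as 2^S > three_k)
def pvLoop1 (threeK : Nat) (S : Nat) (fuel : Nat) : Nat :=
  match fuel with
  | 0 => S
  | f + 1 => if 2 ^ S ≤ threeK then pvLoop1 threeK (S + 1) f else S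

-- while S > 0 and (1 << (S - 1)) > three_k: S -= 1
def pvLoop2 (threeK : Nat) : Nat → Nat
  | 0 => 0
  | S + 1 => if threeK < 2 ^ S then pvLoop2 threeK S else S + 1

-- compute_S(k): Python seeds S with ceil(k*log2(3)) (a float); the two correction
-- loops make the result independent of any nonnegative seed (it is the minimal S
-- with 2^S > 3^k), so this port seeds S = 0 — exact for k ≥ 1 (all of Pre_).
def compute_S (k : Int) : Int :=
  let threeK : Nat := 3 ^ k.toNat
  let S := pvLoop1 threeK 0 (threeK + 1)
  ((pvLoop2 threeK S : Nat) : Int)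

def compute_max_B (k : Int) : Int := compute_S k - k

-- itertools.combinations_with_replacement(l, r), in Python's lexicographic order
def pvCWR (l : List Int) (r : Nat) : List (List Int) :=
  match r, l with
  | 0, _ => [[]]
  | _ + 1, [] => []
  | r + 1, x :: xs => ((pvCWR (x :: xs) r).map (fun c => x :: c)) ++ pvCWR xs (r + 1)
termination_by (r, l)

def enumerate_B_vectors (k : Int) (max_B : Option Int) : List (List Int) :=
  let mB : Int := match max_B with
    | none => compute_max_B k
    | some m => m
  if k = 1 then [[mB]]
  else
    (pvCWR (PySem.List.pyRange 0 (mB + 1) 1) (k - 1).toNat).flatMap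
      (fun combo =>
        match PySem.List.pyGet? combo (-1) with  -- combo[-1]; none = IndexError (never hit: combos are nonempty)
        | some last => if last ≤ mB then [combo ++ [mB]] else []
        | none => [])

-- ===== PORT B =====
-- gen(remaining, start): nondecreasing tuples of the given length with values in [start, maxB]
def pvGen (maxB : Int) : Nat → Int → List (List Int)
  | 0, _ => [[]]
  | r + 1, start =>
      (PySem.List.pyRange start (maxB + 1) 1).flatMap
        (fun v => (pvGen maxB r v).map (fun rest => v :: rest))

def enumerate_B_vectors_alt (k : Int) (max_B : Option Int) : List (List Int) :=
  let mB : Int := match max_B with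
    | none => ((PySem.Int.bitLength ((3 : Int) ^ k.toNat) : Nat) : Int) - k  -- (3**k).bit_length() - k
    | some m => m
  if k = 1 then [[mB]]
  else (pvGen mB (k - 1).toNat 0).map (fun pre_ => pre_ ++ [mB])

-- ===== PRECONDITION & SPEC =====
-- Python A raises ValueError for every k ≤ 0 (combinations_with_replacement with
-- negative r, or 1 << negative); it returns normally exactly when k ≥ 1.
def Pre_enumerate_B_vectors (k : Int) (max_B : Option Int) : Prop := 1 ≤ k
instance (k : Int) (max_B : Option Int) : Decidable (Pre_enumerate_B_vectors k max_B) := by unfold Pre_enumerate_B_vectors; infer_instance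

def pvWitness_enumerate_B_vectors : Int × Option Int := (3, some 2)

def Spec_enumerate_B_vectors (k : Int) (max_B : Option Int) (out : List (List Int)) : Prop := out = enumerate_B_vectors_alt k max_B
instance (k : Int) (max_B : Option Int) (out : List (List Int)) : Decidable (Spec_enumerate_B_vectors k max_B out) := by unfold Spec_enumerate_B_vectors; infer_instance

-- ===== CLAIM (what is proved, stated in full; the proofs are below) =====
def Claim_equal_enumerate_B_vectors : Prop := ∀ (k : Int) (max_B : Option Int), Dom_enumerate_B_vectors k max_B → Pre_enumerate_B_vectors k max_B → Spec_enumerate_B_vectors k max_B (enumerate_B_vectors k max_B)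

-- ===== LEMMAS AND PROOFS =====

theorem pvLoop1_eq (threeK bl : Nat) (hlt : threeK < 2 ^ bl)
    (hle : ∀ S, S < bl → 2 ^ S ≤ threeK) :
    ∀ fuel S, S ≤ bl → threeK < 2 ^ (S + fuel) → pvLoop1 threeK S fuel = bl := by
  intro fuel
  induction fuel with
  | zero =>
      intro S hS h
      have : bl ≤ S := by
        by_contra h'
        exact absurd (hle S (by omega)) (by simpa using h)
      simp [pvLoop1]; omega
  | succ f ih =>
      intro S hS h
      unfold pvLoop1
      split
      · rename_i hcond
        have hSlt : S < bl := by
          by_contra h'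
          have : 2 ^ bl ≤ 2 ^ S := Nat.pow_le_pow_right (by omega) (by omega)
          omega
        exact ih (S + 1) (by omega) (by simpa [Nat.add_assoc, Nat.add_comm 1 f] using h)
      · rename_i hcond
        have : bl ≤ S := by
          by_contra h'
          exact absurd (hle S (by omega)) hcond
        omega

theorem pvLoop2_eq (threeK bl : Nat) (hle : ∀ S, S < bl → 2 ^ S ≤ threeK) :
    pvLoop2 threeK bl = bl := by
  cases bl with
  | zero => simp [pvLoop2]
  | succ S =>
      unfold pvLoop2
      have := hle S (by omega)
      simp [show ¬ threeK < 2 ^ S by omega]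

-- the two default computations of max_B agree
theorem defaults_eq (k : Int) :
    compute_max_B k = ((PySem.Int.bitLength ((3 : Int) ^ k.toNat) : Nat) : Int) - k := by
  have hcast : ((3 : Int) ^ k.toNat) = ((3 ^ k.toNat : Nat) : Int) := by push_cast; ring
  unfold compute_max_B compute_S
  rw [hcast]
  show ((pvLoop2 (3 ^ k.toNat) (pvLoop1 (3 ^ k.toNat) 0 (3 ^ k.toNat + 1)) : Nat) : Int) - k = _
  set threeK : Nat := 3 ^ k.toNat with hthreeK
  have hpos : 0 < threeK := by rw [hthreeK]; positivity
  set bl := PySem.Int.bitLength ((threeK : Nat) : Int) with hbl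
  have hlt : threeK < 2 ^ bl := by
    simpa [hbl] using PySem.Int.lt_two_pow_bitLength ((threeK : Nat) : Int)
  have hle : ∀ S, S < bl → 2 ^ S ≤ threeK := by
    intro S hS
    have h2 := PySem.Int.two_pow_bitLength_le ((threeK : Nat) : Int)
      (by exact_mod_cast hpos.ne')
    calc 2 ^ S ≤ 2 ^ (bl - 1) := Nat.pow_le_pow_right (by omega) (by omega)
      _ ≤ threeK := by simpa [hbl] using h2
  have h1 : pvLoop1 threeK 0 (threeK + 1) = bl :=
    pvLoop1_eq threeK bl hlt hle _ 0 (by omega)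
      (calc threeK < 2 ^ threeK := Nat.lt_two_pow_self
        _ ≤ 2 ^ (0 + (threeK + 1)) := Nat.pow_le_pow_right (by omega) (by omega))
  rw [h1, pvLoop2_eq threeK bl hle]

-- combinations_with_replacement over range(a, mB+1) coincides with the backtracking generator
theorem cwr_eq_gen (mB : Int) : ∀ (r : Nat) (a : Int),
    pvCWR (PySem.List.pyRange a (mB + 1) 1) r = pvGen mB r a := by
  intro r
  induction r with
  | zero => intro a; cases h : PySem.List.pyRange a (mB + 1) 1 <;> simp [pvCWR, pvGen]
  | succ r ihr =>
      suffices h : ∀ (n : Nat) (a : Int), (mB + 1 - a).toNat = n →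
          pvCWR (PySem.List.pyRange a (mB + 1) 1) (r + 1) = pvGen mB (r + 1) a by
        intro a; exact h _ a rfl
      intro n
      induction n with
      | zero =>
          intro a ha
          have hnil : PySem.List.pyRange a (mB + 1) 1 = [] :=
            PySem.List.pyRange_one_eq_nil (by omega)
          simp [hnil, pvCWR, pvGen]
      | succ n ihn =>
          intro a ha
          have hcons : PySem.List.pyRange a (mB + 1) 1 = a :: PySem.List.pyRange (a + 1) (mB + 1) 1 :=
            PySem.List.pyRange_one_cons (by omega)
          rw [hcons, pvCWR, ← hcons, ihr a, ihn (a + 1) (by omega)]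
          conv_rhs => rw [pvGen, hcons, List.flatMap_cons]
          congr 1

-- every entry of a vector produced by pvGen lies in [a, mB]
theorem mem_pvGen_bound (mB : Int) : ∀ (r : Nat) (a : Int) (xs : List Int),
    xs ∈ pvGen mB r a → ∀ x ∈ xs, a ≤ x ∧ x ≤ mB := by
  intro r
  induction r with
  | zero => intro a xs hxs x hx; simp [pvGen] at hxs; subst hxs; simp at hx
  | succ r ih =>
      intro a xs hxs x hx
      rw [pvGen] at hxs
      simp only [List.mem_flatMap, List.mem_map] at hxs
      obtain ⟨v, hv, rest, hrest, hEq⟩ := hxs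
      have hvr := PySem.List.mem_pyRange_one.mp hv
      subst hEq
      rcases List.mem_cons.mp hx with h | h
      · omega
      · have := ih v rest hrest x h; omega

theorem pvGen_succ_nonempty (mB : Int) (r : Nat) (a : Int) (xs : List Int)
    (hxs : xs ∈ pvGen mB (r + 1) a) : xs ≠ [] := by
  rw [pvGen] at hxs
  simp only [List.mem_flatMap, List.mem_map] at hxs
  obtain ⟨v, _, rest, _, hEq⟩ := hxs
  simp [← hEq]

-- the two port bodies agree for any common max_B value
theorem ports_body_eq (k : Int) (mB : Int) (hk : 1 ≤ k) :
    (if k = 1 then [[mB]]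
     else (pvCWR (PySem.List.pyRange 0 (mB + 1) 1) (k - 1).toNat).flatMap
       (fun combo =>
         match PySem.List.pyGet? combo (-1) with
         | some last => if last ≤ mB then [combo ++ [mB]] else []
         | none => []))
    = (if k = 1 then [[mB]]
       else (pvGen mB (k - 1).toNat 0).map (fun pre_ => pre_ ++ [mB])) := by
  by_cases hk1 : k = 1
  · simp [hk1]
  · simp only [hk1, if_false]
    rw [cwr_eq_gen]
    obtain ⟨r, hr⟩ : ∃ r : Nat, (k - 1).toNat = r + 1 := ⟨(k - 2).toNat, by omega⟩
    rw [hr, show (pvGen mB (r + 1) 0).map (fun pre_ => pre_ ++ [mB]) =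
        (pvGen mB (r + 1) 0).flatMap (fun pre_ => [pre_ ++ [mB]]) from
      List.map_eq_flatMap]
    apply List.flatMap_congr
    intro combo hcombo
    have hne := pvGen_succ_nonempty mB r 0 combo hcombo
    obtain ⟨l, hl⟩ := Option.isSome_iff_exists.mp (List.getLast?_isSome.mpr hne)
    have hget : PySem.List.pyGet? combo (-1) = some l := by
      rw [PySem.List.pyGet?_neg_one, hl]
    have hle : l ≤ mB :=
      (mem_pvGen_bound mB (r + 1) 0 combo hcombo l (List.mem_of_getLast? hl)).2
    rw [hget]
    simp [hle]

-- ===== VERDICT (by name: the statement is the Claim_ definition above) =====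
theorem enumerate_B_vectors_spec : Claim_equal_enumerate_B_vectors := by
  intro k max_B _hdom hpre
  have hk : 1 ≤ k := hpre
  unfold Spec_enumerate_B_vectors
  cases max_B with
  | none =>
      show (if k = 1 then [[compute_max_B k]] else _) = _
      rw [defaults_eq k]
      exact ports_body_eq k _ hk
  | some m =>
      exact ports_body_eq k m hk
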